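-- pv_equiv track=rewrite | github.com/skyhackspl/Challenges | amr-checker.py | balance_and_fix
-- ===== SOURCE A (Python) =====
-- def balance_and_fix(infile):
--
--     content = []
--     count = 0
--     balance = 0
--
--     for i, char in enumerate(infile.strip()):
--         if balance == 1 and char == ")":
--             count += 1
--
--         if char == "(":
--             balance += 1
--
--         if char == ")":
--             balance -= 1
--
--         content.append(char)
--         if balance == 0:
--             content.append("\n\n")
--
--     return (balance, count, "".join(content))
-- ===== SOURCE B (Python) =====
-- def balance_and_fix(infile):
--     chars = infile.strip()
--     # pass 1: running post-char balance table
--     balances = []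
--     b = 0
--     for c in chars:
--         b += 1 if c == "(" else -1 if c == ")" else 0
--         balances.append(b)
--     # pass 2: differently-shaped assembly over the (char, balance) table
--     count = sum(1 for c, bal in zip(chars, balances) if c == ")" and bal == 0)
--     output = "".join(c + ("\n\n" if bal == 0 else "") for c, bal in zip(chars, balances))
--     balance = balances[-1] if balances else 0
--     return (balance, count, output)
-- ===== Notes on version B (the rewrite author's own statement) =====
-- stated objective: alternative
-- what changed: B first builds the running post-char balance table in one pass, then derives the count (a filtered sum over zip), the output (a per-char join over zip) and the final balance (last table entry) in a second, differently-shaped pass, instead of A's single loop mutating three accumulators.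
import Mathlib
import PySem

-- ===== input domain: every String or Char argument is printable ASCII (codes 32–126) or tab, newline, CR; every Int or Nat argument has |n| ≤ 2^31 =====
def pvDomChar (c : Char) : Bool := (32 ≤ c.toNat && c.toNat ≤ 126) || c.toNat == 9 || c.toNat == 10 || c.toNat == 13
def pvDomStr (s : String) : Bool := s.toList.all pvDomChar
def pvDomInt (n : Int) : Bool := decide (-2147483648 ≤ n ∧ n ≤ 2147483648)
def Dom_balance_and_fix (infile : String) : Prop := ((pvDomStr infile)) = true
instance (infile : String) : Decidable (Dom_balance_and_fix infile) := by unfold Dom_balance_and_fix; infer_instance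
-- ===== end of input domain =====

-- B builds the running balance table first and derives count/output/balance in a second pass;
-- A keeps one loop mutating three accumulators. Alternative decomposition, same cost.

-- ===== PORT A =====
-- loop body of A's single for-loop, state = (content, count, balance)
def bafStepA (st : List String × Int × Int) (c : Char) : List String × Int × Int :=
  let content := st.1
  let count := st.2.1
  let balance := st.2.2
  let count := if balance = 1 ∧ c = ')' then count + 1 else count
  let balance := if c = '(' then balance + 1 else balance
  let balance := if c = ')' then balance - 1 else balance
  let content := content ++ [String.ofList [c]]
  let content := if balance = 0 then content ++ ["\n\n"] else content
  (content, count, balance)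

def balance_and_fix (infile : String) : Int × Int × String :=
  let r := (PySem.Str.strip infile).toList.foldl bafStepA ([], 0, 0)
  (r.2.2, r.2.1, PySem.Str.join "" r.1)

-- ===== PORT B =====
-- pass 1 of B: running post-char balance table
def bafBalStep (st : List Int × Int) (c : Char) : List Int × Int :=
  let b := st.2 + (if c = '(' then (1 : Int) else if c = ')' then -1 else 0)
  (st.1 ++ [b], b)

def balance_and_fix_alt (infile : String) : Int × Int × String :=
  let chars := (PySem.Str.strip infile).toList
  let balances := (chars.foldl bafBalStep ([], 0)).1
  let pairs := chars.zip balances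
  let count : Int := ((pairs.filter (fun p => decide (p.1 = ')' ∧ p.2 = 0))).length : Int)
  let output := PySem.Str.join "" (pairs.map (fun p =>
    String.ofList [p.1] ++ (if p.2 = 0 then "\n\n" else "")))
  let balance := match balances.getLast? with
    | some b => b
    | none => 0
  (balance, count, output)

-- ===== PRECONDITION & SPEC =====
def Spec_balance_and_fix (infile : String) (out : Int × Int × String) : Prop := out = balance_and_fix_alt infile
instance (infile : String) (out : Int × Int × String) : Decidable (Spec_balance_and_fix infile out) := by unfold Spec_balance_and_fix; infer_instance

-- ===== CLAIM (what is proved, stated in full; the proofs are below) =====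
def Claim_equal_balance_and_fix : Prop := ∀ (infile : String), Dom_balance_and_fix infile → Spec_balance_and_fix infile (balance_and_fix infile)

-- ===== LEMMAS AND PROOFS =====

/-- per-char balance delta -/
def bafDelta (c : Char) : Int := if c = '(' then 1 else if c = ')' then -1 else 0

/-- post-char balance table starting from `b` -/
def bafScan : Int → List Char → List Int
  | _, [] => []
  | b, c :: cs => (b + bafDelta c) :: bafScan (b + bafDelta c) cs

/-- final balance -/
def bafFin : Int → List Char → Int
  | b, [] => b
  | b, c :: cs => bafFin (b + bafDelta c) cs

/-- content pieces A emits, from initial balance `b` -/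
def bafOut : Int → List Char → List String
  | _, [] => []
  | b, c :: cs =>
      String.ofList [c] :: (if b + bafDelta c = 0 then "\n\n" :: bafOut (b + bafDelta c) cs
                        else bafOut (b + bafDelta c) cs)

/-- count A accumulates, from initial balance `b` -/
def bafCnt : Int → List Char → Int
  | _, [] => 0
  | b, c :: cs => (if b = 1 ∧ c = ')' then 1 else 0) + bafCnt (b + bafDelta c) cs

lemma bafStepA_balance (b : Int) (c : Char) :
    (if c = ')' then (if c = '(' then b + 1 else b) - 1 else (if c = '(' then b + 1 else b))
      = b + bafDelta c := by
  by_cases h1 : c = '(' <;> by_cases h2 : c = ')' <;> simp_all [bafDelta] <;> omega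

lemma foldA_eq : ∀ (l : List Char) (content : List String) (count b : Int),
    l.foldl bafStepA (content, count, b)
      = (content ++ bafOut b l, count + bafCnt b l, bafFin b l) := by
  intro l
  induction l with
  | nil => intro content count b; simp [bafOut, bafCnt, bafFin]
  | cons c cs ih =>
    intro content count b
    simp only [List.foldl_cons, bafStepA, bafStepA_balance, ih, bafOut, bafCnt, bafFin]
    by_cases h : b + bafDelta c = 0 <;>
      by_cases hc : b = 1 ∧ c = ')' <;>
        simp_all [bafDelta, List.append_assoc] <;>
          first
            | omega
            | (split <;> omega)

lemma foldB_eq : ∀ (l : List Char) (acc : List Int) (b : Int),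
    l.foldl bafBalStep (acc, b) = (acc ++ bafScan b l, bafFin b l) := by
  intro l
  induction l with
  | nil => intro acc b; simp [bafScan, bafFin]
  | cons c cs ih =>
    intro acc b
    simp [bafBalStep, ih, bafScan, bafFin, bafDelta]

lemma cnt_eq : ∀ (l : List Char) (b : Int),
    (((l.zip (bafScan b l)).filter (fun p => decide (p.1 = ')') && decide (p.2 = 0))).length : Int)
      = bafCnt b l := by
  intro l
  induction l with
  | nil => intro b; simp [bafScan, bafCnt]
  | cons c cs ih =>
    intro b
    simp only [bafScan, List.zip_cons_cons, List.filter_cons, bafCnt]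
    by_cases h : c = ')' ∧ b + bafDelta c = 0
    · obtain ⟨hc, hb⟩ := h
      subst hc
      have hb1 : b = 1 := by simp [bafDelta] at hb; omega
      subst hb1
      simp [bafDelta, ← ih 0]
      ring
    · have hnc : ¬ (b = 1 ∧ c = ')') := by
        rintro ⟨hb, hc⟩; subst hb hc; exact h ⟨rfl, by simp [bafDelta]⟩
      have hcond : ¬ (c = ')' ∧ (b + bafDelta c) = 0) := h
      simp only [hnc, if_false, Bool.and_eq_true, decide_eq_true_eq]
      rw [if_neg (by simpa using hcond)]
      simpa using ih (b + bafDelta c)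

lemma joinL_nil_cons (p : List Char) (rest : List (List Char)) :
    PySem.Chars.join [] (p :: rest) = p ++ PySem.Chars.join [] rest := by
  cases rest <;>
    simp [PySem.Chars.join_singleton, PySem.Chars.join_cons_cons, PySem.Chars.join_nil]

lemma join_eq : ∀ (l : List Char) (b : Int),
    PySem.Str.join "" ((l.zip (bafScan b l)).map (fun p =>
        String.ofList [p.1] ++ (if p.2 = 0 then "\n\n" else "")))
      = PySem.Str.join "" (bafOut b l) := by
  intro l
  induction l with
  | nil => intro b; simp [bafScan, bafOut]
  | cons c cs ih =>
    intro b
    have hih := congrArg String.toList (ih (b + bafDelta c))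
    simp only [PySem.Str.toList_join, List.map_map] at hih
    simp at hih
    apply String.toList_inj.mp
    simp only [bafScan, bafOut, List.zip_cons_cons, List.map_cons, PySem.Str.toList_join]
    by_cases h : b + bafDelta c = 0
    · rw [h] at hih
      simp [h, joinL_nil_cons, String.toList_append, hih]
    · simp [h, joinL_nil_cons, hih]

lemma last_eq : ∀ (l : List Char) (b : Int),
    (match (bafScan b l).getLast? with | some x => x | none => b) = bafFin b l := by
  intro l
  induction l with
  | nil => intro b; simp [bafScan, bafFin]
  | cons c cs ih =>
    intro b
    simp only [bafScan, bafFin]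
    cases hcs : bafScan (b + bafDelta c) cs with
    | nil => have := ih (b + bafDelta c); simp [hcs] at this ⊢; exact this
    | cons y ys =>
      have := ih (b + bafDelta c)
      simp [hcs] at this ⊢
      exact this

-- ===== VERDICT (by name: the statement is the Claim_ definition above) =====
theorem balance_and_fix_spec : Claim_equal_balance_and_fix := by
  intro infile _
  unfold Spec_balance_and_fix balance_and_fix balance_and_fix_alt
  simp only [foldA_eq, foldB_eq, List.nil_append]
  refine Prod.ext ?_ (Prod.ext ?_ ?_)
  · simp [last_eq]
  · simp [cnt_eq]
  · simp [join_eq]
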